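-- pv_equiv track=rewrite | github.com/emarberg/schurp | tests/test_keys.py | is_morse_schilling_highest_weight
-- ===== SOURCE A (Python) =====
-- def is_morse_schilling_highest_weight(decreasing_factorization):
--     for i in range(len(decreasing_factorization) - 1):
--         a = decreasing_factorization[i]
--         b = decreasing_factorization[i + 1]
--         while a and b:
--             for j in range(len(b) - 1, -1, -1):
--                 if b[j] > a[0]:
--                     b = b[:j] + b[j + 1:]
--                     break
--             a = a[1:]
--         if len(b) != 0:
--             return False
--     return True
-- ===== SOURCE B (Python) =====
-- def is_morse_schilling_highest_weight(decreasing_factorization):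
--     for a, b in zip(decreasing_factorization, decreasing_factorization[1:]):
--         xs = list(a)
--         for y in reversed(b):
--             for i in range(len(xs)):
--                 if xs[i] < y:
--                     del xs[i]
--                     break
--             else:
--                 return False
--     return True
-- ===== Notes on version B (the rewrite author's own statement) =====
-- stated objective: alternative
-- what changed: Inverts the loop nesting: instead of A's per-element-of-a backward rescans of b with slice rebuilding, B walks b once from its right end and lets each entry of b consume the first entry of a that is smaller than it (a dual greedy matching), failing as soon as some entry of b finds no smaller entry of a.
import Mathlib
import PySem

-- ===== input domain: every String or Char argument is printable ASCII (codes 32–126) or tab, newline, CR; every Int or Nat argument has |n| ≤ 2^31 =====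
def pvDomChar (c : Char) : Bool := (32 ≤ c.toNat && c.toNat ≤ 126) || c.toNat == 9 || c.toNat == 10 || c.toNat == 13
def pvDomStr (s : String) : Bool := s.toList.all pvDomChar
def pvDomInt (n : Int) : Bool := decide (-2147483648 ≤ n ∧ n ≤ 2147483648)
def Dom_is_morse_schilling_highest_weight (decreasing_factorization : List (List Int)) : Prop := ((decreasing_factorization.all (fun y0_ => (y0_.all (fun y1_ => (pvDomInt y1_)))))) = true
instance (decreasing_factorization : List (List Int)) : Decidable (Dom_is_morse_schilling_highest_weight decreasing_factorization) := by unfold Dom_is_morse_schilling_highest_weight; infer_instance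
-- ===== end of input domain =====

-- B inverts the loop nesting of A: instead of letting each entry of a remove the
-- rightmost entry of b exceeding it, B walks b once from its right end and lets each
-- entry of b consume the first entry of a smaller than it (objective: alternative).

-- ===== PORT A =====
-- the inner 'for j in range(len(b)-1, -1, -1)' loop: j counts down; first b[j] > x is
-- removed via b[:j] + b[j+1:], then break; if none, b is returned unchanged
def pvInnerLoopA (b : List Int) (x : Int) : Nat → List Int
  | 0 => b
  | j+1 =>
    if PySem.List.pyGetD b (j : Int) 0 > x then
      PySem.List.slice b none (some (j : Int)) ++ PySem.List.slice b (some ((j : Int) + 1)) none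
    else pvInnerLoopA b x j

-- the 'while a and b:' loop; 'a = a[1:]' is the structural tail
def pvWhileA : List Int → List Int → List Int
  | [], b => b
  | _ :: _, [] => []
  | x :: rest, y :: bs => pvWhileA rest (pvInnerLoopA (y :: bs) x (y :: bs).length)

-- the outer 'for i in range(len(df)-1)' with early 'return False'
def pvOuterA (df : List (List Int)) : List Int → Bool
  | [] => true
  | i :: is =>
    let a := PySem.List.pyGetD df i []
    let b := PySem.List.pyGetD df (i + 1) []
    if (pvWhileA a b).length ≠ 0 then false else pvOuterA df is

def is_morse_schilling_highest_weight (decreasing_factorization : List (List Int)) : Bool :=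
  pvOuterA decreasing_factorization
    (PySem.List.pyRange 0 ((decreasing_factorization.length : Int) - 1) 1)

-- ===== PORT B =====
-- the inner 'for i in range(len(xs)): if xs[i] < y: del xs[i]; break' scan:
-- some (xs with the first entry < y deleted), or none if the for-else fires
def pvRemoveFirstSmaller (y : Int) : List Int → Option (List Int)
  | [] => none
  | x :: xs => if x < y then some xs else Option.map (fun t => x :: t) (pvRemoveFirstSmaller y xs)

-- the 'for y in reversed(b)' loop (applied to b.reverse), with early 'return False'
def pvPairB : List Int → List Int → Bool
  | _, [] => true
  | xs, y :: rest =>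
    match pvRemoveFirstSmaller y xs with
    | none => false
    | some xs' => pvPairB xs' rest

-- the outer 'for a, b in zip(df, df[1:])' loop
def pvOuterB : List ((List Int) × (List Int)) → Bool
  | [] => true
  | (a, b) :: ps => if pvPairB a b.reverse then pvOuterB ps else false

def is_morse_schilling_highest_weight_alt (decreasing_factorization : List (List Int)) : Bool :=
  pvOuterB (decreasing_factorization.zip decreasing_factorization.tail)

-- ===== PRECONDITION & SPEC =====
def Spec_is_morse_schilling_highest_weight (decreasing_factorization : List (List Int)) (out : Bool) : Prop := out = is_morse_schilling_highest_weight_alt decreasing_factorization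
instance (decreasing_factorization : List (List Int)) (out : Bool) : Decidable (Spec_is_morse_schilling_highest_weight decreasing_factorization out) := by unfold Spec_is_morse_schilling_highest_weight; infer_instance

-- ===== CLAIM (what is proved, stated in full; the proofs are below) =====
def Claim_equal_is_morse_schilling_highest_weight : Prop := ∀ (decreasing_factorization : List (List Int)), Dom_is_morse_schilling_highest_weight decreasing_factorization → Spec_is_morse_schilling_highest_weight decreasing_factorization (is_morse_schilling_highest_weight decreasing_factorization)

-- ===== LEMMAS AND PROOFS =====

-- proof-side intermediate: A's inner backward scan, seen on b.reverse, removes the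
-- FIRST element > x; pvGoB is A's while loop in that presentation
def pvWithoutFirstGreater (x : Int) : List Int → List Int
  | [] => []
  | y :: ys => if y > x then ys else y :: pvWithoutFirstGreater x ys

def pvGoB : List Int → List Int → Bool
  | [], remaining => remaining.isEmpty
  | x :: rest, remaining =>
    if remaining.isEmpty then true else pvGoB rest (pvWithoutFirstGreater x remaining)

-- the backward scan over bs ++ [y] restricted to indices < bs.length acts on bs and keeps [y]
theorem pvInner_append (bs : List Int) (y x : Int) :
    ∀ j : Nat, j ≤ bs.length →
      pvInnerLoopA (bs ++ [y]) x j = pvInnerLoopA bs x j ++ [y] := by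
  intro j
  induction j with
  | zero => intro _; simp [pvInnerLoopA]
  | succ j ih =>
    intro hj
    have hjlt : j < bs.length := by omega
    unfold pvInnerLoopA
    have hget : PySem.List.pyGetD (bs ++ [y]) (j : Int) 0 = PySem.List.pyGetD bs (j : Int) 0 := by
      simp [PySem.List.pyGetD_natCast, List.getD, List.getElem?_append_left hjlt]
    rw [hget]
    by_cases h : PySem.List.pyGetD bs (j : Int) 0 > x
    · simp only [h, if_pos]
      have hcast : ((j : Int) + 1) = ((j + 1 : Nat) : Int) := by push_cast; ring
      rw [hcast, PySem.List.slice_to_natCast, PySem.List.slice_to_natCast,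
        PySem.List.slice_from_natCast, PySem.List.slice_from_natCast]
      rw [List.take_append_of_le_length (by omega), List.drop_append_of_le_length (by omega)]
      simp
    · simp only [h, ih (by omega)]
      simp

-- removing the rightmost element > x of b = removing the first element > x of b.reverse
theorem pvInner_eq_wfg (x : Int) (b : List Int) :
    pvInnerLoopA b x b.length = (pvWithoutFirstGreater x b.reverse).reverse := by
  induction b using List.reverseRecOn with
  | nil => simp [pvInnerLoopA, pvWithoutFirstGreater]
  | append_singleton bs y ih =>
    have hlen : (bs ++ [y]).length = bs.length + 1 := by simp
    rw [hlen]
    unfold pvInnerLoopA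
    have hget : PySem.List.pyGetD (bs ++ [y]) (bs.length : Int) 0 = y := by
      simp [PySem.List.pyGetD_natCast, List.getD]
    rw [hget]
    by_cases h : y > x
    · simp only [h, if_pos]
      have hcast : ((bs.length : Int) + 1) = ((bs.length + 1 : Nat) : Int) := by push_cast; ring
      rw [hcast, PySem.List.slice_to_natCast, PySem.List.slice_from_natCast]
      simp [pvWithoutFirstGreater, h, List.take_append_of_le_length (le_refl bs.length)]
    · simp only [h]
      rw [pvInner_append bs y x bs.length (le_refl _), ih]
      simp [pvWithoutFirstGreater, h]

-- the while-loop of A empties b exactly when the fold over b.reverse reports true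
theorem pvWhile_eq_go (a : List Int) :
    ∀ b : List Int, (pvWhileA a b).isEmpty = pvGoB a b.reverse := by
  induction a with
  | nil => intro b; simp [pvWhileA, pvGoB]
  | cons x rest ih =>
    intro b
    cases b with
    | nil => simp [pvWhileA, pvGoB]
    | cons y bs =>
      calc (pvWhileA (x :: rest) (y :: bs)).isEmpty
          = (pvWhileA rest (pvInnerLoopA (y :: bs) x (y :: bs).length)).isEmpty := by
            simp [pvWhileA]
        _ = pvGoB rest ((pvInnerLoopA (y :: bs) x (y :: bs).length).reverse) := ih _
        _ = pvGoB rest (pvWithoutFirstGreater x ((y :: bs).reverse)) := by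
            rw [pvInner_eq_wfg]; simp
        _ = pvGoB (x :: rest) ((y :: bs).reverse) := by
            simp [pvGoB]

-- KEY COMMUTATION: B's dual greedy satisfies exactly A's one-step recursion on a.
-- An entry x of a that is ≥ the head y of rb is passed through to the tail of rb
-- in its original position, so consuming x first and recursing agrees with pvPairB.
theorem pvPairB_step (x : Int) : ∀ (rb a : List Int),
    pvPairB (x :: a) rb = if rb.isEmpty then true else pvPairB a (pvWithoutFirstGreater x rb) := by
  intro rb
  induction rb with
  | nil => intro a; simp [pvPairB]
  | cons y rest ih =>
    intro a
    simp only [List.isEmpty_cons]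
    by_cases hxy : x < y
    · -- x removes y: both sides continue with a and rest
      simp [pvPairB, pvRemoveFirstSmaller, hxy, pvWithoutFirstGreater]
    · -- x skips y; y consumes the first entry of a smaller than it on both sides
      have hy : ¬ y > x := by omega
      simp only [pvPairB, pvRemoveFirstSmaller, if_neg hxy, pvWithoutFirstGreater]
      cases hr : pvRemoveFirstSmaller y a with
      | none => simp
      | some a' =>
        simp only [Option.map_some]
        cases rest with
        | nil => simp [pvPairB, pvWithoutFirstGreater]
        | cons z zs =>
          rw [ih a']
          simp

-- hence A's while-loop presentation pvGoB coincides with B's dual greedy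
theorem pvGo_eq_pairB : ∀ (a rb : List Int), pvGoB a rb = pvPairB a rb := by
  intro a
  induction a with
  | nil =>
    intro rb
    cases rb with
    | nil => simp [pvGoB, pvPairB]
    | cons y rest => simp [pvGoB, pvPairB, pvRemoveFirstSmaller]
  | cons x rest ih =>
    intro rb
    rw [pvPairB_step]
    cases rb with
    | nil => simp [pvGoB]
    | cons y bs => simp only [pvGoB, List.isEmpty_cons]; rw [ih]

-- both sides are trivially true once fewer than two factors remain
theorem pvOuter_nil_case (df : List (List Int)) (k : Nat) (h : df.length ≤ k + 1) :
    pvOuterA df (PySem.List.pyRange (k : Int) ((df.length : Int) - 1) 1)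
      = pvOuterB ((df.drop k).zip (df.drop k).tail) := by
  rw [PySem.List.pyRange_one_eq_nil (by omega)]
  cases hd : df.drop k with
  | nil => simp [pvOuterA, pvOuterB]
  | cons z zs =>
    have hlen := congrArg List.length hd
    simp only [List.length_drop, List.length_cons] at hlen
    have hz : zs = [] := List.eq_nil_of_length_eq_zero (by omega)
    simp [pvOuterA, pvOuterB, hz]

-- main outer induction: A's index loop from k computes B's loop over the pairs of df.drop k
theorem pvOuter_eq (df : List (List Int)) :
    ∀ m k : Nat, df.length - k ≤ m →
      pvOuterA df (PySem.List.pyRange (k : Int) ((df.length : Int) - 1) 1)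
        = pvOuterB ((df.drop k).zip (df.drop k).tail) := by
  intro m
  induction m with
  | zero => intro k hk; exact pvOuter_nil_case df k (by omega)
  | succ m ih =>
    intro k hk
    by_cases h : k + 1 < df.length
    · have hk1 : k < df.length := by omega
      rw [PySem.List.pyRange_one_cons (by omega)]
      have hgA : PySem.List.pyGetD df (k : Int) [] = df[k] := by
        rw [PySem.List.pyGetD_natCast]
        simp [List.getD, List.getElem?_eq_getElem hk1]
      have hgB : PySem.List.pyGetD df ((k : Int) + 1) [] = df[k + 1] := by
        have hc : ((k : Int) + 1) = ((k + 1 : Nat) : Int) := by push_cast; ring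
        rw [hc, PySem.List.pyGetD_natCast]
        simp [List.getD, List.getElem?_eq_getElem h]
      have hdrop : df.drop k = df[k] :: df.drop (k + 1) :=
        List.drop_eq_getElem_cons hk1
      have hdrop1 : df.drop (k + 1) = df[k + 1] :: df.drop (k + 2) :=
        List.drop_eq_getElem_cons h
      have hcast1 : (k : Int) + 1 = ((k + 1 : Nat) : Int) := by push_cast; ring
      show (if (pvWhileA (PySem.List.pyGetD df (k : Int) [])
                  (PySem.List.pyGetD df ((k : Int) + 1) [])).length ≠ 0 then false
            else pvOuterA df (PySem.List.pyRange ((k : Int) + 1) ((df.length : Int) - 1) 1))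
          = pvOuterB ((df.drop k).zip (df.drop k).tail)
      rw [hgA, hgB]
      have hpair : pvPairB df[k] (df[k + 1]).reverse
          = (pvWhileA df[k] df[k + 1]).isEmpty := by
        rw [pvWhile_eq_go, pvGo_eq_pairB]
      by_cases hc : (pvWhileA df[k] df[k + 1]).length = 0
      · have hdomB : pvPairB df[k] (df[k + 1]).reverse = true := by
          rw [hpair]; simp [List.length_eq_zero_iff.mp hc]
        rw [if_neg (not_not_intro hc), hcast1, ih (k + 1) (by omega)]
        conv_lhs => rw [hdrop1]
        conv_rhs => rw [hdrop, hdrop1]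
        simp only [List.tail_cons, List.zip_cons_cons, pvOuterB, hdomB, if_pos]
      · have hdomB : pvPairB df[k] (df[k + 1]).reverse = false := by
          rw [hpair]; simp
          exact fun he => absurd (by rw [he]; rfl) hc
        rw [if_pos hc]
        conv_rhs => rw [hdrop, hdrop1]
        simp only [List.tail_cons, List.zip_cons_cons, pvOuterB, hdomB]
        simp
    · exact pvOuter_nil_case df k (by omega)

-- ===== VERDICT (by name: the statement is the Claim_ definition above) =====
theorem is_morse_schilling_highest_weight_spec : Claim_equal_is_morse_schilling_highest_weight := by
  intro df _
  unfold Spec_is_morse_schilling_highest_weight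
  unfold is_morse_schilling_highest_weight is_morse_schilling_highest_weight_alt
  have h := pvOuter_eq df df.length 0 (by omega)
  simp only [Nat.cast_zero, List.drop_zero] at h
  exact h
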